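-- pv_equiv track=rewrite | github.com/gd-codes/saic-test-2021 | Task 2/ipinfo/ipinfo.py | parse_whois
-- ===== SOURCE A (Python) =====
-- def parse_whois(text):
--     c, d = [], {}
--     for l in text.split('\n'):
--         if l.strip():
--             if l[0]=='%' or l[0]=='#':
--                 if  d : c.append(d)
--                 d = {}
--                 continue
--             k = l.split(':')
--             if k[0] in d:
--                 d[k[0]] += ''.join([x.strip() for x in k[1:]]) + '\n'
--             else :
--                 d[k[0]] = ''.join([x.strip() for x in k[1:]]) + '\n'
--     return c
-- ===== SOURCE B (Python) =====
-- def parse_whois(text):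
--     # Phase 1: partition the non-blank lines into blocks; a comment line
--     # ('%' or '#' as raw first character) flushes the current block (only
--     # flushed blocks are kept, so a trailing open block is dropped).
--     blocks, cur = [], []
--     for l in text.split('\n'):
--         if not l.strip():
--             continue
--         if l[0] == '%' or l[0] == '#':
--             blocks.append(cur)
--             cur = []
--         else:
--             cur.append(l)
--     # Phase 2: build one record per block; keep the non-empty records.
--     out = []
--     for block in blocks:
--         d = {}
--         for l in block:
--             parts = l.split(':')
--             d[parts[0]] = d.get(parts[0], '') + ''.join(x.strip() for x in parts[1:]) + '\n'
--         if d: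
--             out.append(d)
--     return out
-- ===== Notes on version B (the rewrite author's own statement) =====
-- stated objective: simpler
-- what changed: A interleaves block splitting and record building in one loop with two live accumulators; B is decomposed into two phases: first partition the non-blank lines into comment-delimited blocks, then build a dict per block (with d.get-accumulation instead of an in/else branch) and keep the non-empty ones.
import Mathlib
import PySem

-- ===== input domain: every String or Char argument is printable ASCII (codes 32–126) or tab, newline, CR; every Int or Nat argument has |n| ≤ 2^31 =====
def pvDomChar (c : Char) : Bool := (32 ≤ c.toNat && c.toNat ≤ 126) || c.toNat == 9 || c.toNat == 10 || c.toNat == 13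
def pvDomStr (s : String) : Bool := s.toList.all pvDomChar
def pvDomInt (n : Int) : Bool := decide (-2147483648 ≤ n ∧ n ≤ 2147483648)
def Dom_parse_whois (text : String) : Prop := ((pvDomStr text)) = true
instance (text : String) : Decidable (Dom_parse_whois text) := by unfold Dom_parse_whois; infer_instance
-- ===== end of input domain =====

-- B replaces A's single loop with two live accumulators by a two-phase decomposition:
-- partition lines into comment-delimited blocks, then build a record per block.

-- s.split(sep) for a non-empty literal sep (PySem.Str.split? is none only for sep = "")
def pvSplit (s sep : String) : List String := (PySem.Str.split? s sep).getD []

-- ===== PORT A =====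
-- one iteration of A's loop body over state (c, d)
def pvA_line (cd : List (List (String × String)) × PySem.Dict String String) (l : String) :
    List (List (String × String)) × PySem.Dict String String :=
  if PySem.Str.strip l ≠ "" then
    if PySem.Str.pyGet? l 0 = some '%' ∨ PySem.Str.pyGet? l 0 = some '#' then
      (if cd.2.items ≠ [] then cd.1 ++ [cd.2.items] else cd.1, PySem.Dict.empty)
    else
      let k := pvSplit l ":"
      let k0 := k.headD ""
      let v := PySem.Str.join "" ((k.drop 1).map PySem.Str.strip) ++ "\n"
      (cd.1, if cd.2.contains k0 then cd.2.insert k0 (cd.2.getD k0 "" ++ v) else cd.2.insert k0 v)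
  else cd

def parse_whois (text : String) : List (List (String × String)) :=
  ((pvSplit text "\n").foldl pvA_line ([], PySem.Dict.empty)).1

-- ===== PORT B =====
-- phase 1: partition the non-blank lines into comment-delimited blocks
def pvB_phase1 (st : List (List String) × List String) (l : String) :
    List (List String) × List String :=
  if PySem.Str.strip l = "" then st
  else if PySem.Str.pyGet? l 0 = some '%' ∨ PySem.Str.pyGet? l 0 = some '#' then
    (st.1 ++ [st.2], [])
  else (st.1, st.2 ++ [l])

-- phase 2: build one record from a block (d[k] = d.get(k,'') + v)
def pvB_record (block : List String) : PySem.Dict String String :=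
  block.foldl (fun d l =>
    let parts := pvSplit l ":"
    let v := PySem.Str.join "" ((parts.drop 1).map PySem.Str.strip) ++ "\n"
    d.modify (parts.headD "") "" (· ++ v)) PySem.Dict.empty

def parse_whois_alt (text : String) : List (List (String × String)) :=
  ((((pvSplit text "\n").foldl pvB_phase1 ([], [])).1.map
      (fun b => (pvB_record b).items)).filter (fun d => !d.isEmpty))

-- ===== PRECONDITION & SPEC =====
def Spec_parse_whois (text : String) (out : List (List (String × String))) : Prop := out = parse_whois_alt text
instance (text : String) (out : List (List (String × String))) : Decidable (Spec_parse_whois text out) := by unfold Spec_parse_whois; infer_instance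

-- ===== CLAIM (what is proved, stated in full; the proofs are below) =====
def Claim_equal_parse_whois : Prop := ∀ (text : String), Dom_parse_whois text → Spec_parse_whois text (parse_whois text)

-- ===== LEMMAS AND PROOFS =====

-- B's finished output for a list of already-flushed blocks
def pvB_done (bs : List (List String)) : List (List (String × String)) :=
  (bs.map (fun b => (pvB_record b).items)).filter (fun d => !d.isEmpty)

-- A's per-line dict update equals B's modify-based update
theorem pvA_dict_step (d : PySem.Dict String String) (k0 v : String) :
    (if d.contains k0 then d.insert k0 (d.getD k0 "" ++ v) else d.insert k0 v)
      = d.modify k0 "" (· ++ v) := by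
  by_cases h : d.contains k0
  · simp [h, PySem.Dict.modify]
  · rw [if_neg h, PySem.Dict.modify,
      PySem.Dict.getD_of_not_contains d "" (by simpa using h)]
    simp

theorem pvB_record_append (b : List String) (l : String) :
    pvB_record (b ++ [l]) =
      (pvB_record b).modify ((pvSplit l ":").headD "") ""
        (· ++ (PySem.Str.join "" (((pvSplit l ":").drop 1).map PySem.Str.strip) ++ "\n")) := by
  simp [pvB_record]

theorem pvB_done_append (bs : List (List String)) (b : List String) :
    pvB_done (bs ++ [b]) =
      if (pvB_record b).items ≠ [] then pvB_done bs ++ [(pvB_record b).items] else pvB_done bs := by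
  by_cases h : (pvB_record b).items = [] <;>
    simp [pvB_done, List.filter_append, h]

theorem pv_main (lines : List String) :
    ∀ (bs : List (List String)) (cur : List String),
    lines.foldl pvA_line (pvB_done bs, pvB_record cur)
      = (pvB_done (lines.foldl pvB_phase1 (bs, cur)).1,
         pvB_record (lines.foldl pvB_phase1 (bs, cur)).2) := by
  induction lines with
  | nil => intro bs cur; rfl
  | cons l t ih =>
    intro bs cur
    by_cases hb : PySem.Str.strip l = ""
    · have hA : pvA_line (pvB_done bs, pvB_record cur) l = (pvB_done bs, pvB_record cur) := by
        unfold pvA_line; rw [if_neg (by simpa using hb)]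
      have hB : pvB_phase1 (bs, cur) l = (bs, cur) := by
        unfold pvB_phase1; rw [if_pos hb]
      simp only [List.foldl_cons, hA, hB]
      exact ih bs cur
    · by_cases hc : PySem.Str.pyGet? l 0 = some '%' ∨ PySem.Str.pyGet? l 0 = some '#'
      · have hA : pvA_line (pvB_done bs, pvB_record cur) l
            = (pvB_done (bs ++ [cur]), pvB_record []) := by
          unfold pvA_line
          rw [if_pos (by simpa using hb), if_pos hc, pvB_done_append]
          rfl
        have hB : pvB_phase1 (bs, cur) l = (bs ++ [cur], []) := by
          unfold pvB_phase1; rw [if_neg hb, if_pos hc]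
        simp only [List.foldl_cons, hA, hB]
        exact ih (bs ++ [cur]) []
      · have hA : pvA_line (pvB_done bs, pvB_record cur) l
            = (pvB_done bs, pvB_record (cur ++ [l])) := by
          unfold pvA_line
          rw [if_pos (by simpa using hb), if_neg hc, pvB_record_append]
          exact congrArg _ (pvA_dict_step _ _ _)
        have hB : pvB_phase1 (bs, cur) l = (bs, cur ++ [l]) := by
          unfold pvB_phase1; rw [if_neg hb, if_neg hc]
        simp only [List.foldl_cons, hA, hB]
        exact ih bs (cur ++ [l])

-- ===== VERDICT (by name: the statement is the Claim_ definition above) =====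
theorem parse_whois_spec : Claim_equal_parse_whois := by
  intro text _
  unfold Spec_parse_whois parse_whois parse_whois_alt
  have h := pv_main (pvSplit text "\n") [] []
  simp only [pvB_done, List.map_nil, List.filter_nil] at h
  rw [show (pvB_record [] : PySem.Dict String String) = PySem.Dict.empty from rfl] at h
  simpa using congrArg Prod.fst h
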